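-- pv_equiv track=rewrite | github.com/mohsen-haddadi/Stuffs | NOT_GLOBAL_FUNCTIONS_Flush.py | Table_Flush_4_cards
-- ===== SOURCE A (Python) =====
-- def s(Card) :
--     if Card in ('A c','2 c','3 c','4 c','5 c','6 c','7 c','8 c','9 c','10 c','J c','Q c','K c') :
--         return "c"
--     if Card in ('A d','2 d','3 d','4 d','5 d','6 d','7 d','8 d','9 d','10 d','J d','Q d','K d') :
--         return "d"
--     if Card in ('A h','2 h','3 h','4 h','5 h','6 h','7 h','8 h','9 h','10 h','J h','Q h','K h') :
--         return "h"
--     if Card in ('A s','2 s','3 s','4 s','5 s','6 s','7 s','8 s','9 s','10 s','J s','Q s','K s') :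
--         return "s"
--
-- def Table_Flush_4_cards( List ) :
--
--     c = 0; d = 0; h = 0; sp = 0
--     for i in List :
--         if s(i) == "c" : c = c + 1
--         if s(i) == "d" : d = d + 1
--         if s(i) == "h" : h = h + 1
--         if s(i) == "s" : sp = sp + 1
--
--     if 4 in (c,d,h,sp) :
--         return True
--     return False
-- ===== SOURCE B (Python) =====
-- def s(Card) :
--     if Card in ('A c','2 c','3 c','4 c','5 c','6 c','7 c','8 c','9 c','10 c','J c','Q c','K c') :
--         return "c"
--     if Card in ('A d','2 d','3 d','4 d','5 d','6 d','7 d','8 d','9 d','10 d','J d','Q d','K d') :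
--         return "d"
--     if Card in ('A h','2 h','3 h','4 h','5 h','6 h','7 h','8 h','9 h','10 h','J h','Q h','K h') :
--         return "h"
--     if Card in ('A s','2 s','3 s','4 s','5 s','6 s','7 s','8 s','9 s','10 s','J s','Q s','K s') :
--         return "s"
--
-- def Table_Flush_4_cards( List ) :
--     # Group elimination: keep only recognised cards, then repeatedly split off
--     # the whole group sharing the first remaining card's suit; a flush on the
--     # table is found iff some eliminated group has exactly 4 cards.
--     cards = [c for c in List if s(c) is not None]
--     while cards :
--         suit = s(cards[0])
--         group = [c for c in cards if s(c) == suit]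
--         if len(group) == 4 :
--             return True
--         cards = [c for c in cards if s(c) != suit]
--     return False
-- ===== Notes on version B (the rewrite author's own statement) =====
-- stated objective: alternative
-- what changed: Replaces A's single pass accumulating four fixed scalar counters (calling s() four times per card) by group elimination: filter out unrecognised cards, then repeatedly strip the whole group sharing the first remaining card's suit (at most 5 shrinking passes), returning True iff some stripped group has exactly 4 cards.
import Mathlib
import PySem

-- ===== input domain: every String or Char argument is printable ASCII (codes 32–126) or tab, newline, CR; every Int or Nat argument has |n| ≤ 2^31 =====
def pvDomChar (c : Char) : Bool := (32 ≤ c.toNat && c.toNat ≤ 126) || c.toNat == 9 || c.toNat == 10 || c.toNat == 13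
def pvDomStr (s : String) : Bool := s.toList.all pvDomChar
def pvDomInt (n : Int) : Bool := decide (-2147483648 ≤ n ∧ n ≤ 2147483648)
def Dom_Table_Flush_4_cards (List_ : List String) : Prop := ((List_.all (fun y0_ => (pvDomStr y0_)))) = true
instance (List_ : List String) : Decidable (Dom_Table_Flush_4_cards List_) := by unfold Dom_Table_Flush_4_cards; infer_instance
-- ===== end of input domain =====

-- B replaces A's single pass over four fixed scalar counters by group elimination:
-- keep only recognised cards, then repeatedly strip off the whole group sharing the
-- first remaining card's suit, answering true iff some stripped group has exactly 4 cards.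

-- ===== PORT A =====
-- port of helper s: returns some suit letter, or none (Python's implicit None) for unknown cards
def pySuit (Card : String) : Option String :=
  if Card ∈ ["A c","2 c","3 c","4 c","5 c","6 c","7 c","8 c","9 c","10 c","J c","Q c","K c"] then some "c"
  else if Card ∈ ["A d","2 d","3 d","4 d","5 d","6 d","7 d","8 d","9 d","10 d","J d","Q d","K d"] then some "d"
  else if Card ∈ ["A h","2 h","3 h","4 h","5 h","6 h","7 h","8 h","9 h","10 h","J h","Q h","K h"] then some "h"
  else if Card ∈ ["A s","2 s","3 s","4 s","5 s","6 s","7 s","8 s","9 s","10 s","J s","Q s","K s"] then some "s"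
  else none

def Table_Flush_4_cards (List_ : List String) : Bool :=
  let st := List_.foldl (fun (st : Int × Int × Int × Int) i =>
    let st := if pySuit i == some "c" then (st.1 + 1, st.2.1, st.2.2.1, st.2.2.2) else st
    let st := if pySuit i == some "d" then (st.1, st.2.1 + 1, st.2.2.1, st.2.2.2) else st
    let st := if pySuit i == some "h" then (st.1, st.2.1, st.2.2.1 + 1, st.2.2.2) else st
    let st := if pySuit i == some "s" then (st.1, st.2.1, st.2.2.1, st.2.2.2 + 1) else st
    st) (0, 0, 0, 0)
  if st.1 = 4 ∨ st.2.1 = 4 ∨ st.2.2.1 = 4 ∨ st.2.2.2 = 4 then true else false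

-- ===== PORT B =====
-- the 'while cards:' loop of Source B: strip the first card's whole suit group each round
def goFlush : List String → Bool
  | [] => false
  | c0 :: rest =>
    let suit := pySuit c0
    let group := (c0 :: rest).filter (fun c => pySuit c == suit)
    if group.length == 4 then true
    else goFlush ((c0 :: rest).filter (fun c => !(pySuit c == suit)))
termination_by cards => cards.length
decreasing_by
  have hle := List.length_filter_le (fun c => !(pySuit c == pySuit c0)) rest
  simp only [List.filter_cons, beq_self_eq_true, Bool.not_true, Bool.false_eq_true, reduceIte,
    List.length_cons]
  omega

def Table_Flush_4_cards_alt (List_ : List String) : Bool :=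
  goFlush (List_.filter (fun c => (pySuit c).isSome))

-- ===== PRECONDITION & SPEC =====
def Spec_Table_Flush_4_cards (List_ : List String) (out : Bool) : Prop := out = Table_Flush_4_cards_alt List_
instance (List_ : List String) (out : Bool) : Decidable (Spec_Table_Flush_4_cards List_ out) := by unfold Spec_Table_Flush_4_cards; infer_instance

-- ===== CLAIM (what is proved, stated in full; the proofs are below) =====
def Claim_equal_Table_Flush_4_cards : Prop := ∀ (List_ : List String), Dom_Table_Flush_4_cards List_ → Spec_Table_Flush_4_cards List_ (Table_Flush_4_cards List_)

-- ===== LEMMAS AND PROOFS =====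

-- pySuit only ever returns none or one of the four suit letters
theorem pySuit_range (c : String) :
    pySuit c = none ∨ pySuit c = some "c" ∨ pySuit c = some "d" ∨ pySuit c = some "h" ∨ pySuit c = some "s" := by
  unfold pySuit; split_ifs <;> simp

-- A's fold leaves in each counter its start value plus the number of cards of that suit.
theorem pv_fold_counts (L : List String) (a b c d : Int) :
    L.foldl (fun (st : Int × Int × Int × Int) i =>
      let st := if pySuit i == some "c" then (st.1 + 1, st.2.1, st.2.2.1, st.2.2.2) else st
      let st := if pySuit i == some "d" then (st.1, st.2.1 + 1, st.2.2.1, st.2.2.2) else st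
      let st := if pySuit i == some "h" then (st.1, st.2.1, st.2.2.1 + 1, st.2.2.2) else st
      let st := if pySuit i == some "s" then (st.1, st.2.1, st.2.2.1, st.2.2.2 + 1) else st
      st) (a, b, c, d)
    = (a + (L.countP (fun i => pySuit i == some "c") : Int),
       b + (L.countP (fun i => pySuit i == some "d") : Int),
       c + (L.countP (fun i => pySuit i == some "h") : Int),
       d + (L.countP (fun i => pySuit i == some "s") : Int)) := by
  induction L generalizing a b c d with
  | nil => simp
  | cons x xs ih =>
    simp only [List.foldl_cons, List.countP_cons]
    split_ifs with h1 h2 h3 h4 <;> simp_all <;> ring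

-- filtering away one suit's group leaves every other suit's group intact
theorem filter_strip (L : List String) (v w : Option String) (hne : v ≠ w) :
    (L.filter (fun c => !(pySuit c == w))).filter (fun c => pySuit c == v)
      = L.filter (fun c => pySuit c == v) := by
  induction L with
  | nil => simp
  | cons a t ih =>
    by_cases h : pySuit a = v
    · simp [h, hne, ih]
    · by_cases h2 : pySuit a = w <;> simp [h, h2, ih, Ne.symm hne]

-- goFlush finds a group of size exactly 4 iff some suit value present has exactly 4 cards
theorem goFlush_spec (cards : List String) :
    goFlush cards = true ↔
      ∃ v, v ∈ cards.map pySuit ∧ (cards.filter (fun c => pySuit c == v)).length = 4 := by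
  induction cards using goFlush.induct with
  | case1 => simp [goFlush]
  | case2 c0 rest suit group hlen =>
    simp only [group, suit] at hlen
    rw [goFlush, if_pos hlen]
    simp only [true_iff]
    exact ⟨pySuit c0, by simp, by simpa using hlen⟩
  | case3 c0 rest suit group hlen ih =>
    simp only [group, suit] at hlen ih
    rw [goFlush, if_neg hlen, ih]
    constructor
    · rintro ⟨v, hv, h4⟩
      obtain ⟨x, hx, hpx⟩ := List.mem_map.mp hv
      rw [List.mem_filter] at hx
      have hvne : v ≠ pySuit c0 := by rw [← hpx]; simpa using hx.2
      rw [filter_strip _ _ _ hvne] at h4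
      exact ⟨v, List.mem_map.mpr ⟨x, hx.1, hpx⟩, h4⟩
    · rintro ⟨v, hv, h4⟩
      have hvne : v ≠ pySuit c0 := by
        rintro rfl
        exact hlen (by simpa using h4)
      obtain ⟨x, hx, hpx⟩ := List.mem_map.mp hv
      refine ⟨v, List.mem_map.mpr ⟨x, List.mem_filter.mpr ⟨hx, by simp [hpx, hvne]⟩, hpx⟩, ?_⟩
      rw [filter_strip _ _ _ hvne]
      exact h4

-- counting a suit letter among recognised cards equals counting it among all cards
theorem filter_isSome_count (L : List String) (x : String) :
    ((L.filter (fun c => (pySuit c).isSome)).filter (fun c => pySuit c == some x)).length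
      = L.countP (fun c => pySuit c == some x) := by
  rw [List.filter_filter, List.countP_eq_length_filter]
  congr 1
  apply List.filter_congr
  intro a _
  by_cases h : pySuit a = some x <;> simp [h]

theorem Table_Flush_4_cards_eq (L : List String) :
    Table_Flush_4_cards L = Table_Flush_4_cards_alt L := by
  simp only [Table_Flush_4_cards, Table_Flush_4_cards_alt]
  rw [pv_fold_counts]
  simp only [zero_add]
  by_cases hB : goFlush (L.filter (fun c => (pySuit c).isSome)) = true
  · rw [hB]
    obtain ⟨v, hv, h4⟩ := (goFlush_spec _).mp hB
    obtain ⟨x, hx, hpx⟩ := List.mem_map.mp hv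
    rw [List.mem_filter] at hx
    have hsome : (pySuit x).isSome := by simpa using hx.2
    rcases pySuit_range x with h | h | h | h | h
    · rw [h] at hsome; simp at hsome
    all_goals
      rw [hpx] at h; subst h
      rw [filter_isSome_count] at h4
      rw [if_pos]
      omega
  · rw [Bool.not_eq_true] at hB
    rw [hB]
    rw [if_neg]
    intro hcon
    suffices htrue : goFlush (L.filter (fun c => (pySuit c).isSome)) = true by
      rw [hB] at htrue; exact Bool.false_ne_true htrue
    apply (goFlush_spec _).mpr
    have key : ∀ x : String, L.countP (fun c => pySuit c == some x) = 4 →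
        ∃ v, v ∈ (L.filter (fun c => (pySuit c).isSome)).map pySuit ∧
          ((L.filter (fun c => (pySuit c).isSome)).filter (fun c => pySuit c == v)).length = 4 := by
      intro x hx
      have hpos : 0 < L.countP (fun c => pySuit c == some x) := by omega
      rw [List.countP_pos_iff] at hpos
      obtain ⟨a, ha, hpa⟩ := hpos
      have hpa' : pySuit a = some x := by simpa using hpa
      refine ⟨some x, List.mem_map.mpr ⟨a, List.mem_filter.mpr ⟨ha, by simp [hpa']⟩, hpa'⟩, ?_⟩
      rw [filter_isSome_count]; exact hx
    rcases hcon with h | h | h | h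
    · exact key "c" (by omega)
    · exact key "d" (by omega)
    · exact key "h" (by omega)
    · exact key "s" (by omega)

-- ===== VERDICT (by name: the statement is the Claim_ definition above) =====
theorem Table_Flush_4_cards_spec : Claim_equal_Table_Flush_4_cards := by
  intro L _
  exact Table_Flush_4_cards_eq L
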